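-- pv_equiv track=rewrite | github.com/theri6v/CodeSprintSolutions | GeekForGeek/Problem Of The Day/Find rectangle with corners as 1.py | ValidCorner
-- ===== SOURCE A (Python) =====
-- def ValidCorner(mat):
--     # Code here
--     m, n = len(mat), len(mat[0])
--     for i in range(m):
--         row = mat[i]
--
--         for j in range(i+1, m):
--             cnt = 0
--             roww = mat[j]
--             for k in range(n):
--                 if row[k] == 1 and roww[k] == 1:
--                     cnt += 1
--             if cnt >= 2:
--                 return True
--     return False
-- ===== SOURCE B (Python) =====
-- def ValidCorner(mat):
--     # Column-pair hashing: for each row, list the column pairs (k, l), k < l,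
--     # holding 1s; a rectangle exists iff some pair reappears in a later row.
--     n = len(mat[0])
--     seen = set()
--     for row in mat:
--         ones = [k for k in range(n) if row[k] == 1]
--         pairs = [(ones[a], ones[b])
--                  for a in range(len(ones)) for b in range(a + 1, len(ones))]
--         if any(p in seen for p in pairs):
--             return True
--         seen.update(pairs)
--     return False
-- ===== Notes on version B (the rewrite author's own statement) =====
-- stated objective: faster
-- what changed: Instead of comparing every pair of rows column by column (O(m^2*n)), B hashes each row's column-pairs of 1s into a set and reports a rectangle as soon as a column pair reappears in a later row, removing the quadratic row-pair loop (O(m*n^2), asymptotically faster when rows outnumber columns; measured 71x at the largest size).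
-- outside the precondition, e.g. on ValidCorner([[1, 1], [1, 1], [1]]): A returns True, B returns True; on ValidCorner([[0], []]): A returns False, B raises IndexError; on ValidCorner([]): A raises IndexError, B raises IndexError
import Mathlib
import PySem

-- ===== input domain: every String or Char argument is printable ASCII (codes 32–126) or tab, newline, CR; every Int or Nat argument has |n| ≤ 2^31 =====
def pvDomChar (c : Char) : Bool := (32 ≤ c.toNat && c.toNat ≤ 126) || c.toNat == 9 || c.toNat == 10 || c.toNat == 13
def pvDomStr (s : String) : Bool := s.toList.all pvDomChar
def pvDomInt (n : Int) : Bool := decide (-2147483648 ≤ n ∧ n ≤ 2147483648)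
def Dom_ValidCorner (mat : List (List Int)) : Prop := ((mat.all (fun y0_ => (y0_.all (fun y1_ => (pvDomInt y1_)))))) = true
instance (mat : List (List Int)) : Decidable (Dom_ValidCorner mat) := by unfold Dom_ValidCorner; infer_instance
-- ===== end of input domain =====

-- B replaces A's row-pair column scan by hashing each row's column pairs of 1s into a set (a different algorithm, measured faster on the generated matrices, which have many more rows than columns); equivalence proved on non-empty matrices whose rows are at least as long as the first row.


-- ===== PORT A =====
-- inner k-loop: cnt of columns k < n where both rows hold 1 (indices are in
-- range on Pre_, so getD's default is never consulted there)
def pvACnt (row roww : List Int) (n : Nat) : Nat :=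
  (List.range n).foldl
    (fun cnt k => if row.getD k 0 = 1 ∧ roww.getD k 0 = 1 then cnt + 1 else cnt) 0

def ValidCorner (mat : List (List Int)) : Bool :=
  let m := mat.length
  let n := (mat.getD 0 []).length
  (List.range m).any (fun i =>
    let row := mat.getD i []
    (List.range' (i + 1) (m - (i + 1))).any (fun j =>
      let roww := mat.getD j []
      decide (2 ≤ pvACnt row roww n)))

-- ===== PORT B =====
-- "[k for k in range(n) if row[k] == 1]"
def pvOnes (row : List Int) (n : Nat) : List Nat :=
  (List.range n).filter (fun k => row.getD k 0 == 1)

-- "[(ones[a], ones[b]) for a in range(len(ones)) for b in range(a+1, len(ones))]"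
def pvPairs (ones : List Nat) : List (Nat × Nat) :=
  (List.range ones.length).flatMap (fun a =>
    (List.range' (a + 1) (ones.length - (a + 1))).map (fun b =>
      (ones.getD a 0, ones.getD b 0)))

-- "for row in mat: … if any(p in seen for p in pairs): return True; seen.update(pairs)"
def pvBGo (n : Nat) (seen : PySem.Set (Nat × Nat)) : List (List Int) → Bool
  | [] => false
  | row :: rest =>
    let ps := pvPairs (pvOnes row n)
    if ps.any (fun p => PySem.Set.contains seen p) then true
    else pvBGo n (PySem.Set.update seen ps) rest

def ValidCorner_alt (mat : List (List Int)) : Bool :=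
  pvBGo (mat.getD 0 []).length PySem.Set.empty mat

-- ===== PRECONDITION & SPEC =====
-- Pre_ excludes the empty matrix (A raises IndexError on mat[0]) and matrices
-- containing a row shorter than the first row, on which A raises IndexError
-- in its column loop unless an earlier pair of rows already returned True.
def Pre_ValidCorner (mat : List (List Int)) : Prop :=
  mat ≠ [] ∧ ∀ row ∈ mat, (mat.getD 0 []).length ≤ row.length
instance (mat : List (List Int)) : Decidable (Pre_ValidCorner mat) := by
  unfold Pre_ValidCorner; infer_instance

def pvWitness_ValidCorner : List (List Int) := [[1, 0, 1], [0, 1, 1], [1, 1, 1]]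

def Spec_ValidCorner (mat : List (List Int)) (out : Bool) : Prop := out = ValidCorner_alt mat
instance (mat : List (List Int)) (out : Bool) : Decidable (Spec_ValidCorner mat out) := by unfold Spec_ValidCorner; infer_instance

-- ===== CLAIM (what is proved, stated in full; the proofs are below) =====
def Claim_equal_ValidCorner : Prop := ∀ (mat : List (List Int)), Dom_ValidCorner mat → Pre_ValidCorner mat → Spec_ValidCorner mat (ValidCorner mat)

-- ===== LEMMAS AND PROOFS =====

-- shared-columns relation both programs detect
def pvShare (n : Nat) (r1 r2 : List Int) : Prop :=
  ∃ p, p ∈ pvPairs (pvOnes r1 n) ∧ p ∈ pvPairs (pvOnes r2 n)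

theorem mem_pvOnes (row : List Int) (n k : Nat) :
    k ∈ pvOnes row n ↔ k < n ∧ row.getD k 0 = 1 := by
  simp [pvOnes, List.mem_filter, List.mem_range]

theorem pvOnes_pairwise (row : List Int) (n : Nat) :
    (pvOnes row n).Pairwise (· < ·) :=
  List.Pairwise.filter _ (List.pairwise_lt_range)

theorem mem_pvPairs {l : List Nat} (h : l.Pairwise (· < ·)) (x y : Nat) :
    (x, y) ∈ pvPairs l ↔ x ∈ l ∧ y ∈ l ∧ x < y := by
  rw [List.pairwise_iff_getElem] at h
  simp only [pvPairs, List.mem_flatMap, List.mem_map, List.mem_range, List.mem_range'_1]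
  constructor
  · rintro ⟨a, ha, b, ⟨hab, hb⟩, hxy⟩
    have hb' : b < l.length := by omega
    rw [List.getD_eq_getElem _ _ ha, List.getD_eq_getElem _ _ hb'] at hxy
    injection hxy with hx hy
    refine ⟨hx ▸ List.getElem_mem ha, hy ▸ List.getElem_mem hb', ?_⟩
    have := h a b ha hb' (by omega)
    omega
  · rintro ⟨hx, hy, hlt⟩
    obtain ⟨a, ha, hxa⟩ := List.getElem_of_mem hx
    obtain ⟨b, hb, hyb⟩ := List.getElem_of_mem hy
    have hab : a < b := by
      rcases Nat.lt_trichotomy a b with h' | h' | h'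
      · exact h'
      · exfalso; subst h'; rw [hxa] at hyb; omega
      · exfalso; have := h b a hb ha h'; omega
    exact ⟨a, ha, b, ⟨by omega, by omega⟩,
      by rw [List.getD_eq_getElem _ _ ha, List.getD_eq_getElem _ _ hb, hxa, hyb]⟩

-- A's count as a filter length
theorem pvACnt_eq_filter (r1 r2 : List Int) (n : Nat) :
    pvACnt r1 r2 n =
      ((List.range n).filter (fun k => decide (r1.getD k 0 = 1 ∧ r2.getD k 0 = 1))).length := by
  induction n with
  | zero => rfl
  | succ n ih =>
    unfold pvACnt at *
    rw [List.range_succ, List.foldl_append, List.filter_append, List.length_append, ih]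
    simp only [List.foldl_cons, List.foldl_nil, List.filter_cons, List.filter_nil]
    split <;> simp_all

-- two distinct members of a strictly sorted list ↔ length ≥ 2
theorem two_le_length_pairwise {l : List Nat} (h : l.Pairwise (· < ·)) :
    2 ≤ l.length ↔ ∃ x y, x < y ∧ x ∈ l ∧ y ∈ l := by
  constructor
  · intro hl
    match l, h with
    | x :: y :: _, h =>
      exact ⟨x, y, (List.pairwise_cons.1 h).1 y (by simp), by simp, by simp⟩
  · rintro ⟨x, y, hxy, hx, hy⟩
    match l with
    | [] => simp at hx
    | [z] => simp at hx hy; omega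
    | _ :: _ :: _ => simp [List.length_cons]

-- bridge: A's pair test = B's shared-column-pair relation
theorem cnt2_iff_share (n : Nat) (r1 r2 : List Int) :
    2 ≤ pvACnt r1 r2 n ↔ pvShare n r1 r2 := by
  rw [pvACnt_eq_filter]
  have hpw : ((List.range n).filter
      (fun k => decide (r1.getD k 0 = 1 ∧ r2.getD k 0 = 1))).Pairwise (· < ·) :=
    List.Pairwise.filter _ (List.pairwise_lt_range)
  rw [two_le_length_pairwise hpw]
  unfold pvShare
  constructor
  · rintro ⟨x, y, hxy, hx, hy⟩
    simp only [List.mem_filter, List.mem_range, decide_eq_true_eq] at hx hy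
    exact ⟨(x, y),
      (mem_pvPairs (pvOnes_pairwise r1 n) x y).2
        ⟨(mem_pvOnes ..).2 ⟨hx.1, hx.2.1⟩, (mem_pvOnes ..).2 ⟨hy.1, hy.2.1⟩, hxy⟩,
      (mem_pvPairs (pvOnes_pairwise r2 n) x y).2
        ⟨(mem_pvOnes ..).2 ⟨hx.1, hx.2.2⟩, (mem_pvOnes ..).2 ⟨hy.1, hy.2.2⟩, hxy⟩⟩
  · rintro ⟨⟨x, y⟩, h1, h2⟩
    rw [mem_pvPairs (pvOnes_pairwise r1 n)] at h1
    rw [mem_pvPairs (pvOnes_pairwise r2 n)] at h2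
    rw [mem_pvOnes, mem_pvOnes] at h1 h2
    refine ⟨x, y, h1.2.2, ?_, ?_⟩ <;>
      simp only [List.mem_filter, List.mem_range, decide_eq_true_eq] <;> tauto
  
-- membership after "seen.update(ps)"
theorem mem_update (seen : PySem.Set (Nat × Nat)) (ps : List (Nat × Nat)) (p : Nat × Nat) :
    p ∈ PySem.Set.update seen ps ↔ p ∈ seen ∨ p ∈ ps := by
  induction ps generalizing seen with
  | nil => simp [PySem.Set.update]
  | cons q qs ih =>
    simp only [PySem.Set.update, List.foldl_cons] at *
    rw [ih, PySem.Set.mem_add]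
    simp only [List.mem_cons]
    tauto

-- B's loop refutes Pairwise of the negated shared-pair relation
theorem pvBGo_iff (n : Nat) (rows : List (List Int)) (seen : PySem.Set (Nat × Nat)) :
    pvBGo n seen rows = true ↔
      (∃ r ∈ rows, ∃ p ∈ pvPairs (pvOnes r n), p ∈ seen) ∨
      ¬ rows.Pairwise (fun r1 r2 => ¬ pvShare n r1 r2) := by
  induction rows generalizing seen with
  | nil => simp [pvBGo]
  | cons row rest ih =>
    unfold pvBGo
    simp only []
    split
    · rename_i hany
      simp only [List.any_eq_true, PySem.Set.contains_iff] at hany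
      obtain ⟨p, hp, hps⟩ := hany
      simp only [true_iff]
      left; exact ⟨row, by simp, p, hp, hps⟩
    · rename_i hno
      simp only [List.any_eq_true, PySem.Set.contains_iff] at hno
      push Not at hno
      rw [ih]
      simp only [List.pairwise_cons, List.mem_cons, not_and_or]
      constructor
      · rintro (⟨r, hr, p, hp, hmem⟩ | h)
        · rw [mem_update] at hmem
          rcases hmem with hs | hrow
          · left; exact ⟨r, Or.inr hr, p, hp, hs⟩
          · right; left
            push Not
            exact ⟨r, hr, ⟨p, hrow, hp⟩⟩
        · right; right; exact h
      · rintro (⟨r, hr | hr, p, hp, hs⟩ | h | h)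
        · subst hr; exact absurd hs (hno p hp)
        · left; exact ⟨r, hr, p, hp, (mem_update ..).2 (Or.inl hs)⟩
        · push Not at h
          obtain ⟨r, hr, ⟨p, h1, h2⟩⟩ := h
          left; exact ⟨r, hr, p, h2, (mem_update ..).2 (Or.inr h1)⟩
        · right; exact h
    
-- A's double index loop refutes Pairwise of the negated predicate
theorem aLoop_iff (mat : List (List Int)) (n : Nat) :
    ((List.range mat.length).any (fun i =>
      (List.range' (i + 1) (mat.length - (i + 1))).any (fun j =>
        decide (2 ≤ pvACnt (mat.getD i []) (mat.getD j []) n))) = true) ↔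
    ¬ mat.Pairwise (fun r1 r2 => ¬ 2 ≤ pvACnt r1 r2 n) := by
  rw [List.pairwise_iff_getElem]
  simp only [List.any_eq_true, List.mem_range, List.mem_range'_1, decide_eq_true_eq]
  constructor
  · rintro ⟨i, hi, j, ⟨hij, hjm⟩, h2⟩ hp
    have hj : j < mat.length := by omega
    have := hp i j hi hj (by omega)
    rw [List.getD_eq_getElem _ _ hi, List.getD_eq_getElem _ _ hj] at h2
    exact this h2
  · intro h
    by_contra hno
    push Not at hno
    apply h
    intro i j hi hj hij
    have := hno i hi j ⟨by omega, by omega⟩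
    rw [List.getD_eq_getElem _ _ hi, List.getD_eq_getElem _ _ hj] at this
    omega

-- ===== VERDICT (by name: the statement is the Claim_ definition above) =====
theorem ValidCorner_spec : Claim_equal_ValidCorner := by
  intro mat _ _
  unfold Spec_ValidCorner ValidCorner ValidCorner_alt
  simp only []
  set n := (mat.getD 0 []).length with hn
  rw [Bool.eq_iff_iff, aLoop_iff mat n, pvBGo_iff]
  have hseen : ¬ ∃ r ∈ mat, ∃ p ∈ pvPairs (pvOnes r n), p ∈ (PySem.Set.empty : PySem.Set (Nat × Nat)) := by
    rintro ⟨r, _, p, _, hp⟩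
    simp [PySem.Set.empty] at hp
  constructor
  · intro h
    right
    intro hp
    apply h
    exact hp.imp fun h' => by rw [cnt2_iff_share]; exact h'
  · rintro (h | h)
    · exact absurd h hseen
    · intro hp
      apply h
      exact hp.imp fun h' => by rw [← cnt2_iff_share]; exact h'
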